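-- pv_equiv track=rewrite | github.com/sidou06/hackerrank-solutions | Algorithms/Greedy/Priyanka and Toys/Solution.py | toys
-- ===== SOURCE A (Python) =====
-- def toys(w):
--     # Sort the weights in ascending order
--     w.sort()
--
--     # Initialize the number of containers required
--     res = 0
--
--     # Process the list until all weights are assigned to containers
--     while len(w) > 0:
--         # Take the minimum weight as the base for a container
--         mi = w[0]
--
--         # Remove all toys that fit within the weight range of mi to mi + 4
--         while len(w) > 0 and w[0] <= mi + 4:
--             w.pop(0)
--
--         # Increment the container count
--         res += 1
--
--     # Return the total number of containers used
--     return res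
-- ===== SOURCE B (Python) =====
-- def toys(w):
--     res = 0
--     limit = None
--     for x in sorted(w):
--         if limit is None or x > limit:
--             res += 1
--             limit = x + 4
--     return res
-- ===== Notes on version B (the rewrite author's own statement) =====
-- stated objective: faster
-- what changed: Replaces the destructive while-loop with repeated pop(0) (quadratic front removals) by one sorted() pass keeping a running upper limit, counting a new container whenever a weight exceeds it; B also leaves the input list unmutated.
import Mathlib
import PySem

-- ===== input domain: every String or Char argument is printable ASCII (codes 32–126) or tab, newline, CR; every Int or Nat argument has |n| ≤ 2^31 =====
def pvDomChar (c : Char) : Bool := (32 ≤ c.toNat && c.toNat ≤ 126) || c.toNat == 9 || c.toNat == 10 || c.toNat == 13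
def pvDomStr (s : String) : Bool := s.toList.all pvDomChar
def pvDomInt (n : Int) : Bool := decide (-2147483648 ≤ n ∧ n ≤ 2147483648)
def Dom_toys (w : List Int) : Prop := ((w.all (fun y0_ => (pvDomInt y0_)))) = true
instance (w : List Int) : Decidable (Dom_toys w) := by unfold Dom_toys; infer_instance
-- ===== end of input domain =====

-- Header: B replaces A's quadratic pop(0) sweep by a single sorted pass with a running
-- limit (faster, asymptotic); A sorts and empties its argument in place, B does not mutate —
-- the equivalence proved here is about the RETURN value only.

-- ===== PORT A =====
-- inner while: pop from the front while head ≤ m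
def toysDropLe (m : Int) : List Int → List Int
  | [] => []
  | x :: xs => if x ≤ m then toysDropLe m xs else x :: xs

theorem toysDropLe_length_le (m : Int) : ∀ xs : List Int, (toysDropLe m xs).length ≤ xs.length := by
  intro xs
  induction xs with
  | nil => simp [toysDropLe]
  | cons x xs ih =>
    simp only [toysDropLe]
    split
    · exact Nat.le_succ_of_le ih
    · simp

-- outer while: mi = head; drop all ≤ mi+4 (the head itself first); res += 1
def toysLoop : List Int → Int
  | [] => 0
  | x :: xs => 1 + toysLoop (toysDropLe (x + 4) xs)
  termination_by l => l.length
  decreasing_by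
    exact Nat.lt_succ_of_le (toysDropLe_length_le _ _)

def toys (w : List Int) : Int := toysLoop (PySem.List.sorted w (fun a => a) false)

-- ===== PORT B =====
def toysStep (st : Int × Option Int) (x : Int) : Int × Option Int :=
  match st.2 with
  | none => (st.1 + 1, some (x + 4))
  | some l => if x > l then (st.1 + 1, some (x + 4)) else st

def toys_alt (w : List Int) : Int :=
  ((PySem.List.sorted w (fun a => a) false).foldl toysStep (0, none)).1

-- ===== PRECONDITION & SPEC =====
def Spec_toys (w : List Int) (out : Int) : Prop := out = toys_alt w
instance (w : List Int) (out : Int) : Decidable (Spec_toys w out) := by unfold Spec_toys; infer_instance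

-- ===== CLAIM (what is proved, stated in full; the proofs are below) =====
def Claim_equal_toys : Prop := ∀ (w : List Int), Dom_toys w → Spec_toys w (toys w)

-- ===== LEMMAS AND PROOFS =====

-- ===== VERDICT (by name: the statement is the Claim_ definition above) =====
theorem foldl_toysStep_some (s : List Int) : ∀ (r l : Int),
    (s.foldl toysStep (r, some l)).1 = r + toysLoop (toysDropLe l s) := by
  induction s with
  | nil => intro r l; simp [toysDropLe, toysLoop]
  | cons x xs ih =>
    intro r l
    by_cases h : x ≤ l
    · have hx : ¬ x > l := not_lt.mpr h
      simp only [List.foldl_cons, toysStep, hx, toysDropLe, if_pos h]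
      exact ih r l
    · have hx : x > l := lt_of_not_ge h
      simp only [List.foldl_cons, toysStep, if_pos hx, toysDropLe, if_neg h]
      rw [ih (r + 1) (x + 4), toysLoop]
      ring

theorem toysLoop_eq_fold (s : List Int) : (s.foldl toysStep (0, none)).1 = toysLoop s := by
  cases s with
  | nil => simp [toysLoop]
  | cons x xs =>
    simp only [List.foldl_cons, toysStep]
    rw [foldl_toysStep_some, toysLoop]
    ring

theorem toys_spec : Claim_equal_toys := by
  intro w _
  unfold Spec_toys toys toys_alt
  exact (toysLoop_eq_fold _).symm
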